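-- pv_equiv track=rewrite | github.com/Siam344/SwinburneUniversity | SWE30009/Assignment 3/SUT/MUTANTS/mutated_functions.py | mutant25
-- ===== SOURCE A (Python) =====
-- def mutant25(arr):
--     n = len(arr)
--     for i in range(n):
--         swapped = False
--         for j in range(0, n - i - 1):
--             if arr[j] % 2 != 0 and arr[j + 1] % 2 != 0 and arr[j] > arr[j + 1]:  # Swap only if both elements are odd
--                 arr[j], arr[j + 1] = arr[j + 1], arr[j]
--                 swapped = True
--         if not swapped:
--             break
--     return arr
-- ===== SOURCE B (Python) =====
-- def mutant25(arr):
--     # Return value equivalence only: A sorts arr in place and returns it; B builds a new list.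
--     out = []
--     i = 0
--     n = len(arr)
--     while i < n:
--         if arr[i] % 2 == 0:
--             out.append(arr[i])
--             i += 1
--         else:
--             j = i
--             while j < n and arr[j] % 2 != 0:
--                 j += 1
--             out.extend(sorted(arr[i:j]))
--             i = j
--     return out
-- ===== Notes on version B (the rewrite author's own statement) =====
-- stated objective: alternative
-- what changed: Replaces the bubble-sort passes that swap adjacent odd pairs by a single left-to-right segmentation at even elements, sorting each maximal run of odd numbers with sorted() (worst-case O(n log n) vs A's worst-case O(n^2), but not measurably faster on the timed inputs, where A's early break fires); A sorts its argument in place and returns it while B leaves the argument untouched (return values agree).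
import Mathlib
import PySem

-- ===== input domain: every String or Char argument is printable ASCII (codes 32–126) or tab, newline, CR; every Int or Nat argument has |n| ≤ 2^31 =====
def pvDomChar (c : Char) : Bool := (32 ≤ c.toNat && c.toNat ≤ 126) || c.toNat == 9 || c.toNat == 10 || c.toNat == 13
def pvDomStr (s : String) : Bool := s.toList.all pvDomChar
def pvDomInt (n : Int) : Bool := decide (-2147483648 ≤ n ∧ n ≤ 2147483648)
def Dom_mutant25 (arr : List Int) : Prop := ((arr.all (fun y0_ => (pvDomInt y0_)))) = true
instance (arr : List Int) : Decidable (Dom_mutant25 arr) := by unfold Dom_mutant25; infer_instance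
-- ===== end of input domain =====

-- B replaces A's bubble passes over adjacent odd pairs by segmenting at even elements and
-- sorting each maximal odd run; A mutates its argument in place and returns it, B builds a
-- new list — the equivalence proved here is about the return value.

-- ===== PORT A =====

-- arr[j] % 2 != 0
def pvOddB (x : Int) : Bool := PySem.Int.mod x 2 != 0

-- the inner `for j in range(0, w)` loop of A: one bubble pass over a window of w comparisons,
-- returning the new list and the `swapped` flag (A's call sites keep w ≤ len arr - 1)
def pvPass : List Int → Nat → List Int × Bool
  | [], _ => ([], false)
  | [x], _ => ([x], false)
  | x :: y :: rest, 0 => (x :: y :: rest, false)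
  | x :: y :: rest, m + 1 =>
    if pvOddB x ∧ pvOddB y ∧ x > y then
      let p := pvPass (x :: rest) m
      (y :: p.1, true)
    else
      let p := pvPass (y :: rest) m
      (x :: p.1, p.2)

-- the outer `for i in range(n)` loop with its early `break`: window w = n - i - 1, c passes left
def pvOuter : List Int → Nat → Nat → List Int
  | a, _, 0 => a
  | a, w, c + 1 =>
    let p := pvPass a w
    if p.2 then pvOuter p.1 (w - 1) c else p.1

def mutant25 (arr : List Int) : List Int := pvOuter arr (arr.length - 1) arr.length

-- ===== PORT B =====

-- scan: an even element is emitted as is; at an odd element the maximal odd run arr[i:j]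
-- is taken, sorted, and emitted (Source B's inner j-scan and slice = takeWhile/dropWhile)
def sortRuns : List Int → List Int
  | [] => []
  | x :: xs =>
    if pvOddB x then
      PySem.List.sorted (x :: xs.takeWhile pvOddB) (fun z => z) false
        ++ sortRuns (xs.dropWhile pvOddB)
    else
      x :: sortRuns xs
termination_by l => l.length
decreasing_by
  · simpa using Nat.lt_succ_of_le (List.length_dropWhile_le pvOddB xs)
  · simp

def mutant25_alt (arr : List Int) : List Int := sortRuns arr

-- ===== PRECONDITION & SPEC =====
def Spec_mutant25 (arr : List Int) (out : List Int) : Prop := out = mutant25_alt arr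
instance (arr : List Int) (out : List Int) : Decidable (Spec_mutant25 arr out) := by unfold Spec_mutant25; infer_instance

-- ===== CLAIM (what is proved, stated in full; the proofs are below) =====
def Claim_equal_mutant25 : Prop := ∀ (arr : List Int), Dom_mutant25 arr → Spec_mutant25 arr (mutant25 arr)

-- ===== LEMMAS AND PROOFS =====

def srt (l : List Int) : List Int := PySem.List.sorted l (fun z => z) false

theorem srt_nil : srt [] = [] := rfl
theorem srt_singleton (x : Int) : srt [x] = [x] := rfl

theorem length_srt (l : List Int) : (srt l).length = l.length :=
  PySem.List.length_sorted l _ false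

theorem sortRuns_even_cons {x : Int} (h : ¬ pvOddB x) (xs : List Int) :
    sortRuns (x :: xs) = x :: sortRuns xs := by
  rw [sortRuns]; simp [h]

theorem sortRuns_odd_cons {x : Int} (h : pvOddB x) (xs : List Int) :
    sortRuns (x :: xs) = srt (x :: xs.takeWhile pvOddB) ++ sortRuns (xs.dropWhile pvOddB) := by
  rw [sortRuns]; simp [h, srt]

theorem length_sortRuns (l : List Int) : (sortRuns l).length = l.length := by
  induction l using sortRuns.induct with
  | case1 => simp [sortRuns]
  | case2 x xs hx ih =>
      rw [sortRuns_odd_cons hx, List.length_append, length_srt, ih]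
      have := congrArg List.length (List.takeWhile_append_dropWhile (p := pvOddB) (l := xs))
      simp only [List.length_append] at this
      simp; omega
  | case3 x xs hx ih => rw [sortRuns_even_cons hx]; simp [ih]

theorem sortRuns_decomp (l : List Int) :
    sortRuns l = srt (l.takeWhile pvOddB) ++ sortRuns (l.dropWhile pvOddB) := by
  cases l with
  | nil => simp [sortRuns, srt_nil]
  | cons x xs =>
      by_cases hx : pvOddB x
      · rw [List.takeWhile_cons_of_pos hx, List.dropWhile_cons_of_pos hx, sortRuns_odd_cons hx]
      · rw [List.takeWhile_cons_of_neg hx, List.dropWhile_cons_of_neg hx, srt_nil,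
          List.nil_append]

theorem sortRuns_cons_break {x y : Int} (h : ¬ (pvOddB x ∧ pvOddB y)) (l : List Int) :
    sortRuns (x :: y :: l) = x :: sortRuns (y :: l) := by
  by_cases hx : pvOddB x
  · have hy : ¬ pvOddB y := fun hy => h ⟨hx, hy⟩
    rw [sortRuns_odd_cons hx, List.takeWhile_cons_of_neg hy, List.dropWhile_cons_of_neg hy,
      srt_singleton, List.singleton_append]
  · exact sortRuns_even_cons hx _

theorem sortRuns_swap {x y : Int} (hx : pvOddB x) (hy : pvOddB y) (l : List Int) :
    sortRuns (x :: y :: l) = sortRuns (y :: x :: l) := by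
  rw [sortRuns_odd_cons hx, sortRuns_odd_cons hy,
    List.takeWhile_cons_of_pos hy, List.takeWhile_cons_of_pos hx,
    List.dropWhile_cons_of_pos hy, List.dropWhile_cons_of_pos hx]
  congr 1
  exact (PySem.List.sorted_id_eq_sorted_id_iff_perm _ _).mpr (List.Perm.swap _ _ _)
theorem mem_srt {e : Int} {l : List Int} (h : e ∈ srt l) : e ∈ l :=
  (PySem.List.sorted_perm l _ false).mem_iff.mp h

theorem dropWhile_shape (p : Int → Bool) (l : List Int) :
    l.dropWhile p = [] ∨ ∃ h t, l.dropWhile p = h :: t ∧ ¬ p h := by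
  induction l with
  | nil => exact Or.inl rfl
  | cons a l ih =>
      by_cases ha : p a
      · rw [List.dropWhile_cons_of_pos ha]; exact ih
      · exact Or.inr ⟨a, l, List.dropWhile_cons_of_neg ha, ha⟩

theorem take_drop_sortRuns (l : List Int) :
    (sortRuns l).takeWhile pvOddB = srt (l.takeWhile pvOddB) ∧
    (sortRuns l).dropWhile pvOddB = sortRuns (l.dropWhile pvOddB) := by
  rw [sortRuns_decomp l]
  have hall : (srt (l.takeWhile pvOddB)).takeWhile pvOddB = srt (l.takeWhile pvOddB) := by
    rw [List.takeWhile_eq_self_iff]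
    intro e he
    exact List.mem_takeWhile_imp (mem_srt he)
  have hnil : (srt (l.takeWhile pvOddB)).dropWhile pvOddB = [] := by
    rw [List.dropWhile_eq_nil_iff]
    intro e he
    exact List.mem_takeWhile_imp (mem_srt he)
  have htail : (sortRuns (l.dropWhile pvOddB)).takeWhile pvOddB = [] ∧
      (sortRuns (l.dropWhile pvOddB)).dropWhile pvOddB = sortRuns (l.dropWhile pvOddB) := by
    rcases dropWhile_shape pvOddB l with h | ⟨hd, t, heq, hhd⟩
    · simp [h, sortRuns]
    · rw [heq, sortRuns_even_cons hhd]
      exact ⟨List.takeWhile_cons_of_neg hhd, List.dropWhile_cons_of_neg hhd⟩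
  constructor
  · rw [List.takeWhile_append, hall]
    simp [htail.1]
  · rw [List.dropWhile_append, hnil]
    simp [htail.2]
theorem srt_perm (l : List Int) : (srt l).Perm l := PySem.List.sorted_perm l _ false

theorem srt_congr {l₁ l₂ : List Int} (h : l₁.Perm l₂) : srt l₁ = srt l₂ :=
  (PySem.List.sorted_id_eq_sorted_id_iff_perm _ _).mpr h

theorem sortRuns_cons_congr (x : Int) {l₁ l₂ : List Int} (h : sortRuns l₁ = sortRuns l₂) :
    sortRuns (x :: l₁) = sortRuns (x :: l₂) := by
  by_cases hx : pvOddB x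
  · have h1 := (take_drop_sortRuns l₁).1.symm.trans ((congrArg (List.takeWhile pvOddB) h).trans (take_drop_sortRuns l₂).1)
    have h2 := (take_drop_sortRuns l₁).2.symm.trans ((congrArg (List.dropWhile pvOddB) h).trans (take_drop_sortRuns l₂).2)
    rw [sortRuns_odd_cons hx, sortRuns_odd_cons hx, h2]
    congr 1
    exact srt_congr (List.Perm.cons x (((srt_perm _).symm.trans (h1 ▸ srt_perm _))))
  · rw [sortRuns_even_cons hx, sortRuns_even_cons hx, h]

theorem sortRuns_pass (a : List Int) (w : Nat) : sortRuns (pvPass a w).1 = sortRuns a := by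
  induction a, w using pvPass.induct with
  | case1 t => simp [pvPass]
  | case2 t x => simp [pvPass]
  | case3 x y rest => simp [pvPass]
  | case4 x y rest m hc ih =>
      obtain ⟨hx, hy, _⟩ := hc
      simp only [pvPass, if_pos (show pvOddB x = true ∧ pvOddB y = true ∧ x > y from ⟨hx, hy, ‹x > y›⟩)]
      calc sortRuns (y :: (pvPass (x :: rest) m).1)
          = sortRuns (y :: x :: rest) := sortRuns_cons_congr y ih
        _ = sortRuns (x :: y :: rest) := sortRuns_swap hy hx rest
  | case5 x y rest m hc ih =>
      simp only [pvPass, if_neg hc]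
      exact sortRuns_cons_congr x ih

theorem pass_false_eq (a : List Int) (w : Nat) (h : (pvPass a w).2 = false) :
    (pvPass a w).1 = a := by
  induction a, w using pvPass.induct with
  | case1 t => simp [pvPass]
  | case2 t x => simp [pvPass]
  | case3 x y rest => simp [pvPass]
  | case4 x y rest m hc ih => simp only [pvPass, if_pos hc] at h; exact absurd h (by simp)
  | case5 x y rest m hc ih =>
      simp only [pvPass, if_neg hc] at h ⊢
      rw [ih h]
theorem pairwise_take_drop {l : List Int} (h : l.Pairwise (· ≤ ·)) {n : Nat}
    {a b : Int} (ha : a ∈ l.take n) (hb : b ∈ l.drop n) : a ≤ b := by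
  have h2 : (l.take n ++ l.drop n).Pairwise (· ≤ ·) := by
    rw [List.take_append_drop]; exact h
  exact (List.pairwise_append.mp h2).2.2 a ha b hb

theorem sorted_count_split (z : Int) {B : List Int} (h : B.Pairwise (· ≤ ·)) :
    (∀ a ∈ B.take (B.countP (fun e => decide (e < z))), a < z) ∧
    (∀ b ∈ B.drop (B.countP (fun e => decide (e < z))), z ≤ b) := by
  induction B with
  | nil => simp
  | cons b B ih =>
      rw [List.pairwise_cons] at h
      by_cases hb : b < z
      · have hc1 : (b :: B).countP (fun e => decide (e < z)) =
            B.countP (fun e => decide (e < z)) + 1 :=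
          List.countP_cons_of_pos (p := fun e => decide (e < z)) (by simpa using hb)
        have h' := ih h.2
        rw [hc1]
        constructor
        · intro a ha
          rw [List.take_succ_cons] at ha
          rcases List.mem_cons.mp ha with rfl | ha
          · exact hb
          · exact h'.1 a ha
        · intro c hc
          rw [List.drop_succ_cons] at hc
          exact h'.2 c hc
      · have hz : z ≤ b := not_lt.mp hb
        have hcount : (b :: B).countP (fun e => decide (e < z)) = 0 := by
          rw [List.countP_eq_zero]
          intro e he
          rcases List.mem_cons.mp he with rfl | he
          · simpa using hb
          · simp only [decide_eq_true_eq]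
            exact not_lt.mpr (le_trans hz (h.1 e he))
        rw [hcount]
        refine ⟨by simp, ?_⟩
        intro c hc
        rcases List.mem_cons.mp (by simpa using hc) with rfl | hc
        · exact hz
        · exact le_trans hz (h.1 c hc)

theorem srt_pairwise (l : List Int) : (srt l).Pairwise (· ≤ ·) := by
  have := PySem.List.sorted_pairwise l (fun z => z)
  simpa [srt] using this

theorem srt_cons_decomp (z : Int) (M : List Int) :
    srt (z :: M) = (srt M).take ((srt M).countP (fun e => decide (e < z))) ++
      z :: (srt M).drop ((srt M).countP (fun e => decide (e < z))) := by
  set B := srt M with hB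
  set p := B.countP (fun e => decide (e < z)) with hp
  have hsplit := sorted_count_split z (srt_pairwise M)
  rw [← hB, ← hp] at hsplit
  apply PySem.List.sorted_id_eq_of_perm_of_pairwise
  · calc (B.take p ++ z :: B.drop p).Perm (z :: (B.take p ++ B.drop p)) := List.perm_middle
      _ = z :: B := by rw [List.take_append_drop]
      _ |>.Perm (z :: M) := List.Perm.cons z (srt_perm M)
  · rw [List.pairwise_append]
    refine ⟨List.Pairwise.sublist (List.take_sublist _ _) (srt_pairwise M), ?_, ?_⟩
    · rw [List.pairwise_cons]
      exact ⟨hsplit.2, List.Pairwise.sublist (List.drop_sublist _ _) (srt_pairwise M)⟩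
    · intro a ha b hb
      rcases List.mem_cons.mp hb with rfl | hb
      · exact le_of_lt (hsplit.1 a ha)
      · exact le_trans (le_of_lt (hsplit.1 a ha)) (hsplit.2 b hb)
theorem drop_remove (X : List Int) (z : Int) (Y : List Int) {k : Nat} (h : X.length < k) :
    (X ++ z :: Y).drop k = (X ++ Y).drop (k - 1) := by
  induction X generalizing k with
  | nil =>
      obtain ⟨k', rfl⟩ : ∃ k', k = k' + 1 := ⟨k - 1, by omega⟩
      simp
  | cons a X ih =>
      obtain ⟨k', rfl⟩ : ∃ k', k = k' + 1 := ⟨k - 1, by omega⟩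
      have hX : X.length < k' := by simpa using h
      simp only [List.cons_append, List.drop_succ_cons]
      rw [ih hX]
      obtain ⟨k'', rfl⟩ : ∃ k'', k' = k'' + 1 := ⟨k' - 1, by omega⟩
      simp

theorem cons_perm_head {x c : Int} {T : List Int} (h : (x :: T).Perm (c :: T)) : x = c := by
  by_contra hne
  have := h.count_eq x
  rw [List.count_cons, List.count_cons] at this
  simp [Ne.symm hne] at this

theorem settled_one (a : List Int) (h : a.drop 1 = (sortRuns a).drop 1) : a = sortRuns a := by
  cases a with
  | nil => simp [sortRuns]
  | cons x t =>
      by_cases hx : pvOddB x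
      · rw [sortRuns_odd_cons hx] at h ⊢
        set T := t.takeWhile pvOddB with hT
        set D := t.dropWhile pvOddB with hD
        have hlen : (srt (x :: T)).length = T.length + 1 := by rw [length_srt]; simp
        have hsplit : t = (srt (x :: T)).drop 1 ++ sortRuns D := by
          simpa [List.drop_append_of_le_length (show 1 ≤ (srt (x :: T)).length by omega)] using h
        have htD : T ++ D = t := List.takeWhile_append_dropWhile
        have hinj := List.append_inj (htD.trans hsplit)
          (by rw [List.length_drop, hlen]; simp)
        obtain ⟨h1, h2⟩ := hinj
        obtain ⟨c, cs, hcs⟩ : ∃ c cs, srt (x :: T) = c :: cs := by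
          cases hsrt : srt (x :: T) with
          | nil => rw [hsrt] at hlen; simp at hlen
          | cons c cs => exact ⟨c, cs, rfl⟩
        have hcsT : cs = T := by
          have := h1.symm
          rw [hcs] at this
          simpa using this
        have hperm : (c :: T).Perm (x :: T) := by
          have := srt_perm (x :: T)
          rw [hcs, hcsT] at this
          exact this
        have hxc : x = c := cons_perm_head hperm.symm
        rw [hcs, hcsT, ← hxc, ← h2, ← htD]
        simp
      · rw [sortRuns_even_cons hx] at h ⊢
        simpa using h
theorem count_lt_le {x y z w' : Int} {rest : List Int} {m : Nat}
    (hx : pvOddB x) (hy : pvOddB y)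
    (hzw : (z = x ∧ w' = y) ∨ (z = y ∧ w' = x))
    (hz1 : z ≤ x) (hz2 : z ≤ y)
    (hse : (x :: y :: rest).drop (m + 2) = (sortRuns (x :: y :: rest)).drop (m + 2)) :
    (w' :: rest.takeWhile pvOddB).countP (fun e => decide (e < z)) ≤ m := by
  set T := rest.takeWhile pvOddB with hT
  set D := rest.dropWhile pvOddB with hD
  have hzw' : z ≤ w' := by rcases hzw with ⟨_, rfl⟩ | ⟨_, rfl⟩ <;> [exact hz2; exact hz1]
  have hcw : (w' :: T).countP (fun e => decide (e < z)) = T.countP (fun e => decide (e < z)) :=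
    List.countP_cons_of_neg (by simpa using not_lt.mpr hzw')
  rw [hcw]
  by_cases hTm : T.length ≤ m
  · exact le_trans List.countP_le_length hTm
  · -- the settled suffix of the run consists of elements ≥ z
    have hm : m < T.length := by omega
    have hrest : T ++ D = rest := List.takeWhile_append_dropWhile
    have hSL : sortRuns (x :: y :: rest) = srt (x :: y :: T) ++ sortRuns D := by
      rw [sortRuns_odd_cons hx, List.takeWhile_cons_of_pos hy, List.dropWhile_cons_of_pos hy]
    have hlhs : (x :: y :: rest).drop (m + 2) = T.drop m ++ D := by
      show rest.drop m = _
      rw [← hrest, List.drop_append_of_le_length (le_of_lt hm)]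
    have hlenR : (srt (x :: y :: T)).length = T.length + 2 := by rw [length_srt]; simp
    have hrhs : (sortRuns (x :: y :: rest)).drop (m + 2) =
        (srt (x :: y :: T)).drop (m + 2) ++ sortRuns D := by
      rw [hSL, List.drop_append_of_le_length (by omega)]
    have hinj := List.append_inj (hlhs.symm.trans (hse.trans hrhs))
      (by rw [List.length_drop, List.length_drop, hlenR]; omega)
    have hT2 : T.drop m = (srt (x :: y :: T)).drop (m + 2) := hinj.1
    -- z occurs in the first m+2 elements of the sorted run
    have hcount : 0 < ((srt (x :: y :: T)).take (m + 2)).count z := by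
      have hsum : ((srt (x :: y :: T)).take (m + 2)).count z +
          ((srt (x :: y :: T)).drop (m + 2)).count z = (srt (x :: y :: T)).count z := by
        rw [← List.count_append, List.take_append_drop]
      have hperm : (srt (x :: y :: T)).count z = (x :: y :: T).count z :=
        (srt_perm _).count_eq z
      have hz_mem : 1 + T.count z ≤ (x :: y :: T).count z := by
        rcases hzw with ⟨rfl, _⟩ | ⟨rfl, _⟩ <;> simp [List.count_cons] <;> omega
      have hdropc : ((srt (x :: y :: T)).drop (m + 2)).count z ≤ T.count z := by
        rw [← hT2]
        exact List.Sublist.count_le z (List.drop_sublist m T)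
      omega
    have hzmem : z ∈ (srt (x :: y :: T)).take (m + 2) := List.count_pos_iff.mp hcount
    have hge : ∀ e ∈ T.drop m, z ≤ e := by
      intro e he
      rw [hT2] at he
      exact pairwise_take_drop (srt_pairwise _) hzmem he
    have hcsplit : T.countP (fun e => decide (e < z)) =
        (T.take m).countP (fun e => decide (e < z)) +
        (T.drop m).countP (fun e => decide (e < z)) := by
      rw [← List.countP_append, List.take_append_drop]
    have hzero : (T.drop m).countP (fun e => decide (e < z)) = 0 :=
      List.countP_eq_zero.mpr (fun e he => by simpa using not_lt.mpr (hge e he))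
    have htake : (T.take m).countP (fun e => decide (e < z)) ≤ m :=
      le_trans List.countP_le_length (by simp)
    omega

theorem core_drop {x y z w' : Int} {rest : List Int} {m k : Nat}
    (hx : pvOddB x) (hy : pvOddB y)
    (hzw : (z = x ∧ w' = y) ∨ (z = y ∧ w' = x))
    (hz1 : z ≤ x) (hz2 : z ≤ y)
    (hse : (x :: y :: rest).drop (m + 2) = (sortRuns (x :: y :: rest)).drop (m + 2))
    (hk : m + 1 ≤ k) :
    (sortRuns (x :: y :: rest)).drop k = (sortRuns (w' :: rest)).drop (k - 1) := by
  set T := rest.takeWhile pvOddB with hT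
  set D := rest.dropWhile pvOddB with hD
  have hw' : pvOddB w' := by rcases hzw with ⟨_, rfl⟩ | ⟨_, rfl⟩ <;> [exact hy; exact hx]
  have hSL : sortRuns (x :: y :: rest) = srt (x :: y :: T) ++ sortRuns D := by
    rw [sortRuns_odd_cons hx, List.takeWhile_cons_of_pos hy, List.dropWhile_cons_of_pos hy]
  have hSK : sortRuns (w' :: rest) = srt (w' :: T) ++ sortRuns D := sortRuns_odd_cons hw' rest
  have hperm : (x :: y :: T).Perm (z :: w' :: T) := by
    rcases hzw with ⟨rfl, rfl⟩ | ⟨rfl, rfl⟩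
    · exact List.Perm.refl _
    · exact List.Perm.swap _ _ _
  set B := srt (w' :: T) with hB
  set p := B.countP (fun e => decide (e < z)) with hp
  have hdecomp : srt (x :: y :: T) = B.take p ++ z :: B.drop p :=
    (srt_congr hperm).trans (srt_cons_decomp z (w' :: T))
  have hpm : p ≤ m := by
    have : p = (w' :: T).countP (fun e => decide (e < z)) := (srt_perm _).countP_eq _
    rw [this]
    exact count_lt_le hx hy hzw hz1 hz2 hse
  have hplen : (B.take p).length = p := by
    rw [List.length_take, length_srt]
    have : p ≤ (w' :: T).length := by
      rw [hp, hB]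
      exact le_trans List.countP_le_length (by rw [length_srt])
    omega
  calc (sortRuns (x :: y :: rest)).drop k
      = ((B.take p ++ z :: B.drop p) ++ sortRuns D).drop k := by rw [hSL, hdecomp]
    _ = (B.take p ++ z :: (B.drop p ++ sortRuns D)).drop k := by simp
    _ = (B.take p ++ (B.drop p ++ sortRuns D)).drop (k - 1) :=
        drop_remove _ z _ (by omega)
    _ = (B ++ sortRuns D).drop (k - 1) := by rw [← List.append_assoc, List.take_append_drop]
    _ = (sortRuns (w' :: rest)).drop (k - 1) := by rw [hSK]
theorem sortRuns_singleton (x : Int) : sortRuns [x] = [x] := by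
  by_cases hx : pvOddB x
  · rw [sortRuns_odd_cons hx]; simp [sortRuns, srt_singleton]
  · rw [sortRuns_even_cons hx]; simp [sortRuns]

theorem pass_progress (w : Nat) (a : List Int)
    (h : a.drop (w + 1) = (sortRuns a).drop (w + 1)) :
    (pvPass a w).1.drop w = (sortRuns (pvPass a w).1).drop w := by
  revert h
  induction a, w using pvPass.induct with
  | case1 t => intro h; simp [pvPass, sortRuns]
  | case2 t x =>
      intro h
      cases t with
      | zero => simpa [pvPass] using (settled_one [x] (by simpa using h)).symm.symm
      | succ t =>
          simp only [pvPass]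
          rw [List.drop_eq_nil_of_le (by simp), List.drop_eq_nil_of_le (by simp [sortRuns_singleton])]
  | case3 x y rest =>
      intro h
      simpa [pvPass] using settled_one _ (by simpa using h)
  | case4 x y rest m hc ih =>
      intro h
      obtain ⟨hx, hy, hgt⟩ := hc
      have hcore := fun (k : Nat) (hk : m + 1 ≤ k) =>
        core_drop (z := y) (w' := x) hx hy (Or.inr ⟨rfl, rfl⟩) (le_of_lt hgt) le_rfl h hk
      have htrans : (x :: rest).drop (m + 1) = (sortRuns (x :: rest)).drop (m + 1) := by
        have h1 : (x :: rest).drop (m + 1) = (x :: y :: rest).drop (m + 2) := by simp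
        rw [h1, h, hcore (m + 2) (by omega)]; norm_num
      have ihr := ih htrans
      simp only [pvPass, if_pos (show pvOddB x = true ∧ pvOddB y = true ∧ x > y from ⟨hx, hy, hgt⟩)]
      have hS : sortRuns (y :: (pvPass (x :: rest) m).1) = sortRuns (x :: y :: rest) := by
        calc sortRuns (y :: (pvPass (x :: rest) m).1)
            = sortRuns (y :: x :: rest) := sortRuns_cons_congr y (sortRuns_pass _ _)
          _ = sortRuns (x :: y :: rest) := sortRuns_swap hy hx rest
      rw [hS]
      calc (y :: (pvPass (x :: rest) m).1).drop (m + 1)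
          = (pvPass (x :: rest) m).1.drop m := by simp
        _ = (sortRuns (pvPass (x :: rest) m).1).drop m := ihr
        _ = (sortRuns (x :: rest)).drop m := by rw [sortRuns_pass]
        _ = (sortRuns (x :: y :: rest)).drop (m + 1) := by
              rw [hcore (m + 1) le_rfl]; norm_num
  | case5 x y rest m hc ih =>
      intro h
      simp only [pvPass, if_neg hc]
      by_cases hb : pvOddB x ∧ pvOddB y
      · obtain ⟨hx, hy⟩ := hb
        have hle : x ≤ y := by
          by_contra hgt
          exact hc ⟨hx, hy, lt_of_not_ge hgt⟩
        have hcore := fun (k : Nat) (hk : m + 1 ≤ k) =>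
          core_drop (z := x) (w' := y) hx hy (Or.inl ⟨rfl, rfl⟩) le_rfl hle h hk
        have htrans : (y :: rest).drop (m + 1) = (sortRuns (y :: rest)).drop (m + 1) := by
          have h1 : (y :: rest).drop (m + 1) = (x :: y :: rest).drop (m + 2) := by simp
          rw [h1, h, hcore (m + 2) (by omega)]; norm_num
        have ihr := ih htrans
        have hS : sortRuns (x :: (pvPass (y :: rest) m).1) = sortRuns (x :: y :: rest) :=
          sortRuns_cons_congr x (sortRuns_pass _ _)
        rw [hS]
        calc (x :: (pvPass (y :: rest) m).1).drop (m + 1)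
            = (pvPass (y :: rest) m).1.drop m := by simp
          _ = (sortRuns (pvPass (y :: rest) m).1).drop m := ihr
          _ = (sortRuns (y :: rest)).drop m := by rw [sortRuns_pass]
          _ = (sortRuns (x :: y :: rest)).drop (m + 1) := by
                rw [hcore (m + 1) le_rfl]; norm_num
      · have hbreak : sortRuns (x :: y :: rest) = x :: sortRuns (y :: rest) :=
          sortRuns_cons_break hb rest
        have htrans : (y :: rest).drop (m + 1) = (sortRuns (y :: rest)).drop (m + 1) := by
          have := h
          rw [hbreak] at this
          simpa using this
        have ihr := ih htrans
        have hS : sortRuns (x :: (pvPass (y :: rest) m).1) = x :: sortRuns (y :: rest) := by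
          rw [sortRuns_cons_congr x (sortRuns_pass _ _), hbreak]
        rw [hS]
        calc (x :: (pvPass (y :: rest) m).1).drop (m + 1)
            = (pvPass (y :: rest) m).1.drop m := by simp
          _ = (sortRuns (pvPass (y :: rest) m).1).drop m := ihr
          _ = (sortRuns (y :: rest)).drop m := by rw [sortRuns_pass]
          _ = (x :: sortRuns (y :: rest)).drop (m + 1) := by simp

theorem pass_break (w : Nat) (a : List Int)
    (h : a.drop (w + 1) = (sortRuns a).drop (w + 1)) (hf : (pvPass a w).2 = false) :
    a = sortRuns a := by
  revert h hf
  induction a, w using pvPass.induct with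
  | case1 t => intro _ _; simp [sortRuns]
  | case2 t x => intro _ _; rw [sortRuns_singleton]
  | case3 x y rest => intro h _; exact settled_one _ (by simpa using h)
  | case4 x y rest m hc ih => intro h hf; simp [pvPass, if_pos hc] at hf
  | case5 x y rest m hc ih =>
      intro h hf
      simp only [pvPass, if_neg hc] at hf
      by_cases hb : pvOddB x ∧ pvOddB y
      · obtain ⟨hx, hy⟩ := hb
        have hle : x ≤ y := by
          by_contra hgt
          exact hc ⟨hx, hy, lt_of_not_ge hgt⟩
        have hcore := fun (k : Nat) (hk : m + 1 ≤ k) =>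
          core_drop (z := x) (w' := y) hx hy (Or.inl ⟨rfl, rfl⟩) le_rfl hle h hk
        have htrans : (y :: rest).drop (m + 1) = (sortRuns (y :: rest)).drop (m + 1) := by
          have h1 : (y :: rest).drop (m + 1) = (x :: y :: rest).drop (m + 2) := by simp
          rw [h1, h, hcore (m + 2) (by omega)]; norm_num
        have hfix : y :: rest = sortRuns (y :: rest) := ih htrans hf
        -- the tail being fully settled and x ≤ y means the whole list is settled
        set T := rest.takeWhile pvOddB with hT
        set D := rest.dropWhile pvOddB with hD
        have hrest : T ++ D = rest := List.takeWhile_append_dropWhile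
        have hSy : sortRuns (y :: rest) = srt (y :: T) ++ sortRuns D := sortRuns_odd_cons hy rest
        have hinj := List.append_inj
          (show (y :: T) ++ D = srt (y :: T) ++ sortRuns D by
            rw [← hSy, ← hfix, List.cons_append, hrest])
          (by rw [length_srt])
        have hsrtfix : srt (y :: T) = y :: T := hinj.1.symm
        have hpw : (y :: T).Pairwise (· ≤ ·) := by
          rw [← hsrtfix]; exact srt_pairwise _
        have hpwx : (x :: y :: T).Pairwise (· ≤ ·) := by
          rw [List.pairwise_cons]
          refine ⟨?_, hpw⟩
          intro e he
          rcases List.mem_cons.mp he with rfl | he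
          · exact hle
          · exact le_trans hle ((List.pairwise_cons.mp hpw).1 e he)
        have hsort : srt (x :: y :: T) = x :: y :: T :=
          PySem.List.sorted_eq_self_of_pairwise _ _ hpwx
        have hDfix : sortRuns D = D := hinj.2.symm
        rw [sortRuns_odd_cons hx, List.takeWhile_cons_of_pos hy, List.dropWhile_cons_of_pos hy,
          ← hT, ← hD, hsort, hDfix, List.cons_append, List.cons_append, hrest]
      · rw [sortRuns_cons_break hb rest]
        have htrans : (y :: rest).drop (m + 1) = (sortRuns (y :: rest)).drop (m + 1) := by
          have := h
          rw [sortRuns_cons_break hb rest] at this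
          simpa using this
        rw [← ih htrans hf]

theorem pass_zero_flag (a : List Int) : (pvPass a 0).2 = false := by
  match a with
  | [] => simp [pvPass]
  | [x] => simp [pvPass]
  | x :: y :: rest => simp [pvPass]

theorem outer_sortRuns (c w : Nat) (a : List Int)
    (h : a.drop (w + 1) = (sortRuns a).drop (w + 1)) (hc : w + 1 ≤ c) :
    pvOuter a w c = sortRuns a := by
  induction c generalizing w a with
  | zero => omega
  | succ c ih =>
      show (let p := pvPass a w; if p.2 then pvOuter p.1 (w - 1) c else p.1) = sortRuns a
      cases hflag : (pvPass a w).2 with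
      | false =>
          simp only [hflag, if_neg Bool.false_ne_true]
          rw [pass_false_eq a w hflag]
          exact pass_break w a h hflag
      | true =>
          simp only [hflag]
          obtain ⟨v, rfl⟩ : ∃ v, w = v + 1 := by
            cases w with
            | zero => rw [pass_zero_flag] at hflag; exact absurd hflag (by simp)
            | succ v => exact ⟨v, rfl⟩
          have hprog := pass_progress (v + 1) a h
          rw [ih (v + 1 - 1) _ (by simpa using hprog) (by omega), sortRuns_pass]; simp

-- ===== VERDICT (by name: the statement is the Claim_ definition above) =====
theorem mutant25_spec : Claim_equal_mutant25 := by
  intro arr _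
  show mutant25 arr = mutant25_alt arr
  unfold mutant25 mutant25_alt
  cases arr with
  | nil => simp [pvOuter, sortRuns]
  | cons x xs =>
    apply outer_sortRuns
    · rw [List.drop_eq_nil_of_le (by simp), List.drop_eq_nil_of_le (by simp [length_sortRuns])]
    · simp
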